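-- pv_equiv track=rewrite | github.com/MirFurqann/Team-18-_Game | statespacegraph.py | find_xyz_combinations
-- ===== SOURCE A (Python) =====
-- def find_xyz_combinations(target_sums):
--     # Initialize a dictionary to hold the combinations for each target sum
--     combinations = {target_sum: [] for target_sum in target_sums}
--
--     # Iterate through possible values of x, y, z
--     for x in range(26):
--         for y in range(26):
--             for z in range(26):
--                 # Calculate the sum of x, y, z
--                 current_sum = x + y + z
--                 # If the sum is one of the target sums, add the combination
--                 if current_sum in target_sums:
--                     combinations[current_sum].append((x, y, z))
--
--     return combinations
-- ===== SOURCE B (Python) =====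
-- def find_xyz_combinations(target_sums):
--     def combos(t):
--         out = []
--         for x in range(26):
--             for y in range(26):
--                 z = t - x - y
--                 if 0 <= z <= 25:
--                     out.append((x, y, z))
--         return out
--     return {t: combos(t) for t in target_sums}
-- ===== Notes on version B (the rewrite author's own statement) =====
-- stated objective: faster
-- what changed: Instead of enumerating all 26^3 triples and testing each sum for membership in target_sums, B computes z = t - x - y directly for each target key over a 26^2 (x,y) grid, eliminating the innermost loop and the linear membership scan.
import Mathlib
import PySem

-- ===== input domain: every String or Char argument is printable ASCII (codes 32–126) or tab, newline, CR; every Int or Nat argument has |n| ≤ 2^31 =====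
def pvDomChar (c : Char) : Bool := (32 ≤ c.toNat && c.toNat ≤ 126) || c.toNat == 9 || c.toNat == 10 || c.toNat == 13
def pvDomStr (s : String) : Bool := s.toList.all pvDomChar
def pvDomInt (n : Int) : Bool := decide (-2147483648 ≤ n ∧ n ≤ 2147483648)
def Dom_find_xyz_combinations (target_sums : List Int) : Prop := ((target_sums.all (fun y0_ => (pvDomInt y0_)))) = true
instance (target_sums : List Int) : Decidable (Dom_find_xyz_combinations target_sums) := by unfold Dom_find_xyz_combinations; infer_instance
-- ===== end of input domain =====

-- B replaces A's innermost 26-iteration enumerate-and-test (with a linear membership scan) by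
-- computing z = t - x - y directly for each target key: a 26² computed-coordinate pass per key.

-- ===== PORT A =====
def find_xyz_combinations (target_sums : List Int) : List (Int × List (Int × Int × Int)) :=
  -- combinations = {target_sum: [] for target_sum in target_sums}
  let d0 : PySem.Dict Int (List (Int × Int × Int)) :=
    target_sums.foldl (fun d t => d.insert t []) PySem.Dict.empty
  -- for x in range(26): for y in range(26): for z in range(26): …
  let d :=
    (PySem.List.pyRange 0 26 1).foldl (fun d x =>
      (PySem.List.pyRange 0 26 1).foldl (fun d y =>
        (PySem.List.pyRange 0 26 1).foldl (fun d z =>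
          if (x + y + z) ∈ target_sums then
            -- combinations[current_sum].append((x, y, z)) — key always present (current_sum ∈ target_sums)
            d.modify (x + y + z) [] (fun l => l ++ [(x, y, z)])
          else d) d) d) d0
  d.items

-- ===== PORT B =====
def pvCombos (t : Int) : List (Int × Int × Int) :=
  (PySem.List.pyRange 0 26 1).foldl (fun out x =>
    (PySem.List.pyRange 0 26 1).foldl (fun out y =>
      let z := t - x - y
      if 0 ≤ z ∧ z ≤ 25 then out ++ [(x, y, z)] else out) out) []

def find_xyz_combinations_alt (target_sums : List Int) : List (Int × List (Int × Int × Int)) :=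
  -- {t: combos(t) for t in target_sums}
  (target_sums.foldl (fun d t => d.insert t (pvCombos t))
    (PySem.Dict.empty : PySem.Dict Int (List (Int × Int × Int)))).items

-- ===== PRECONDITION & SPEC =====
def Spec_find_xyz_combinations (target_sums : List Int) (out : List (Int × List (Int × Int × Int))) : Prop := out = find_xyz_combinations_alt target_sums
instance (target_sums : List Int) (out : List (Int × List (Int × Int × Int))) : Decidable (Spec_find_xyz_combinations target_sums out) := by unfold Spec_find_xyz_combinations; infer_instance

-- ===== CLAIM (what is proved, stated in full; the proofs are below) =====
def Claim_equal_find_xyz_combinations : Prop := ∀ (target_sums : List Int), Dom_find_xyz_combinations target_sums → Spec_find_xyz_combinations target_sums (find_xyz_combinations target_sums)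

-- ===== LEMMAS AND PROOFS =====

-- the list of all triples the three nested loops of A visit, in visitation order
def pvTriples : List (Int × Int × Int) :=
  (PySem.List.pyRange 0 26 1).flatMap (fun x =>
    (PySem.List.pyRange 0 26 1).flatMap (fun y =>
      (PySem.List.pyRange 0 26 1).map (fun z => (x, y, z))))

-- A's nested loops are a single fold over pvTriples
theorem pvA_fold_eq (ts : List Int) (d : PySem.Dict Int (List (Int × Int × Int))) :
    (PySem.List.pyRange 0 26 1).foldl (fun d x =>
      (PySem.List.pyRange 0 26 1).foldl (fun d y =>
        (PySem.List.pyRange 0 26 1).foldl (fun d z =>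
          if (x + y + z) ∈ ts then d.modify (x + y + z) [] (fun l => l ++ [(x, y, z)]) else d) d) d) d
    = pvTriples.foldl (fun d p =>
        if (p.1 + p.2.1 + p.2.2) ∈ ts then
          d.modify (p.1 + p.2.1 + p.2.2) [] (fun l => l ++ [p]) else d) d := by
  unfold pvTriples
  rw [List.foldl_flatMap]
  refine PySem.List.foldl_congr_mem _ _ _ _ (fun d x _ => ?_)
  rw [List.foldl_flatMap]
  refine PySem.List.foldl_congr_mem _ _ _ _ (fun d y _ => ?_)
  rw [List.foldl_map]

-- the keys never change through A's loop (every modified key is already present)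
theorem pvA_keys (ts : List Int) (L : List (Int × Int × Int))
    (d : PySem.Dict Int (List (Int × Int × Int))) (hk : ∀ s ∈ ts, s ∈ d.keys) :
    (L.foldl (fun d p =>
        if (p.1 + p.2.1 + p.2.2) ∈ ts then
          d.modify (p.1 + p.2.1 + p.2.2) [] (fun l => l ++ [p]) else d) d).keys = d.keys := by
  induction L generalizing d with
  | nil => rfl
  | cons p L ih =>
    simp only [List.foldl_cons]
    by_cases hmem : (p.1 + p.2.1 + p.2.2) ∈ ts
    · have hcont : d.contains (p.1 + p.2.1 + p.2.2) = true :=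
        (PySem.Dict.contains_iff_mem_keys d _).mpr (hk _ hmem)
      have hkeys : (d.modify (p.1 + p.2.1 + p.2.2) [] (fun l => l ++ [p])).keys = d.keys := by
        rw [PySem.Dict.keys_modify, PySem.Dict.keys_insert_of_contains _ _ hcont]
      rw [if_pos hmem, ih _ (fun s hs => hkeys ▸ hk s hs), hkeys]
    · rw [if_neg hmem, ih _ hk]

-- the value collected at a key t ∈ ts is exactly the triples with sum t, in order
theorem pvA_getD (ts : List Int) (t : Int) (ht : t ∈ ts) (L : List (Int × Int × Int))
    (d : PySem.Dict Int (List (Int × Int × Int))) :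
    (L.foldl (fun d p =>
        if (p.1 + p.2.1 + p.2.2) ∈ ts then
          d.modify (p.1 + p.2.1 + p.2.2) [] (fun l => l ++ [p]) else d) d).getD t []
    = d.getD t [] ++ L.filter (fun p => p.1 + p.2.1 + p.2.2 = t) := by
  induction L generalizing d with
  | nil => simp
  | cons p L ih =>
    simp only [List.foldl_cons, List.filter_cons]
    by_cases hsum : p.1 + p.2.1 + p.2.2 = t
    · rw [if_pos (hsum ▸ ht), ih, PySem.Dict.getD_modify]
      simp [hsum]
    · by_cases hmem : (p.1 + p.2.1 + p.2.2) ∈ ts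
      · rw [if_pos hmem, ih, PySem.Dict.getD_modify, if_neg (fun h => hsum h.symm)]
        simp [hsum]
      · rw [if_neg hmem, ih]
        simp [hsum]

-- the initial dict maps everything to []
theorem pvD0_getD (ts : List Int) (d : PySem.Dict Int (List (Int × Int × Int)))
    (h : ∀ k, d.getD k [] = []) (k : Int) :
    (ts.foldl (fun d t => d.insert t []) d).getD k [] = [] := by
  induction ts generalizing d with
  | nil => exact h k
  | cons t ts ih =>
    refine ih _ (fun k => ?_)
    rw [PySem.Dict.getD_insert]
    split <;> simp [h]

-- B's dict maps each key k ∈ ts to pvCombos k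
theorem pvB_getD (ts : List Int) (k : Int) (d : PySem.Dict Int (List (Int × Int × Int))) :
    (ts.foldl (fun d t => d.insert t (pvCombos t)) d).getD k []
    = if k ∈ ts then pvCombos k else d.getD k [] := by
  induction ts generalizing d with
  | nil => simp
  | cons t ts ih =>
    simp only [List.foldl_cons, ih, PySem.Dict.getD_insert, List.mem_cons]
    by_cases hk : k ∈ ts
    · simp [hk]
    · by_cases he : k = t <;> simp [hk, he]

-- a Nodup list filtered for equality with c is [c] or []
theorem pvFilter_eq_single {l : List Int} (hl : l.Nodup) (c : Int) :
    l.filter (fun a => a = c) = if c ∈ l then [c] else [] := by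
  induction l with
  | nil => simp
  | cons a l ih =>
    rcases List.nodup_cons.mp hl with ⟨ha, hl'⟩
    rw [List.filter_cons]
    by_cases hac : a = c
    · subst hac
      have hnil : l.filter (fun x => decide (x = a)) = [] :=
        List.filter_eq_nil_iff.mpr (fun b hb => by
          simp only [decide_eq_true_eq]; rintro rfl; exact ha hb)
      simp [hnil]
    · simp only [decide_eq_true_eq, if_neg hac]
      rw [ih hl']
      by_cases hc : c ∈ l
      · simp [hc]
      · have hca : c ∉ a :: l := by
          simp only [List.mem_cons, not_or]
          exact ⟨fun h => hac h.symm, hc⟩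
        simp [hc, hca]

-- filter distributes over flatMap
theorem pvFilter_flatMap {α β : Type} (l : List α) (f : α → List β) (p : β → Bool) :
    (l.flatMap f).filter p = l.flatMap (fun a => (f a).filter p) := by
  induction l with
  | nil => rfl
  | cons a l ih => simp [List.flatMap_cons, List.filter_append, ih]

-- filter-then-map as a flatMap of singletons
theorem pvFilterMap_eq_flatMap {α β : Type} (l : List α) (p : α → Bool) (f : α → β) :
    (l.filter p).map f = l.flatMap (fun a => if p a then [f a] else []) := by
  induction l with
  | nil => rfl
  | cons a l ih =>
    rw [List.filter_cons, List.flatMap_cons, ← ih]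
    by_cases h : p a <;> simp [h]

-- pvCombos t is exactly the triples with sum t, in visitation order
theorem pvCombos_eq_filter (t : Int) :
    pvCombos t = pvTriples.filter (fun p => p.1 + p.2.1 + p.2.2 = t) := by
  have hnd : (PySem.List.pyRange 0 26 1).Nodup := by decide
  unfold pvCombos pvTriples
  rw [pvFilter_flatMap]
  rw [show (fun d x =>
        (PySem.List.pyRange 0 26 1).foldl (fun out y =>
          let z := t - x - y
          if 0 ≤ z ∧ z ≤ 25 then out ++ [(x, y, z)] else out) d)
      = fun d x => d ++ ((PySem.List.pyRange 0 26 1).filter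
          (fun y => decide (0 ≤ t - x - y ∧ t - x - y ≤ 25))).map
          (fun y => (x, y, t - x - y)) from
    funext fun d => funext fun x =>
      PySem.List.foldl_append_ite (fun y => 0 ≤ t - x - y ∧ t - x - y ≤ 25)
        (fun y => (x, y, t - x - y)) _ d]
  rw [PySem.List.foldl_append_eq_flatMap, List.nil_append]
  refine List.flatMap_congr (fun x _ => ?_)
  rw [pvFilterMap_eq_flatMap, pvFilter_flatMap]
  refine List.flatMap_congr (fun y _ => ?_)
  rw [List.filter_map]
  have : (fun p => decide (p.1 + p.2.1 + p.2.2 = t)) ∘ (fun z => ((x, y, z) : Int × Int × Int))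
      = fun z => decide (z = t - x - y) := by
    funext z; simp only [Function.comp]; rw [decide_eq_decide]; omega
  rw [this, show (fun z => decide (z = t - x - y)) = (fun z : Int => decide ((fun a => a = t - x - y) z)) from rfl]
  rw [pvFilter_eq_single hnd (t - x - y)]
  by_cases hz : (t - x - y) ∈ PySem.List.pyRange 0 26 1
  · have h1 := PySem.List.mem_pyRange_one.mp hz
    rw [if_pos hz, if_pos (show decide (0 ≤ t - x - y ∧ t - x - y ≤ 25) = true by
      simp only [decide_eq_true_eq]; omega)]
    rfl
  · have h2 : ¬ (decide (0 ≤ t - x - y ∧ t - x - y ≤ 25) = true) := by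
      simp only [decide_eq_true_eq]
      intro h; exact hz (PySem.List.mem_pyRange_one.mpr ⟨h.1, by omega⟩)
    rw [if_neg hz, if_neg h2]
    rfl

-- ===== VERDICT (by name: the statement is the Claim_ definition above) =====
theorem find_xyz_combinations_spec : Claim_equal_find_xyz_combinations := by
  intro ts _
  unfold Spec_find_xyz_combinations find_xyz_combinations find_xyz_combinations_alt
  simp only []
  set d0 : PySem.Dict Int (List (Int × Int × Int)) :=
    ts.foldl (fun d t => d.insert t []) PySem.Dict.empty with hd0
  have hkeys0 : d0.keys = PySem.Set.ofList ts := by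
    rw [hd0, PySem.Dict.keys_foldl_insert ts (fun _ _ => []) PySem.Dict.empty,
      PySem.Dict.keys_empty]
    rfl
  have hnd0 : d0.keys.Nodup := hkeys0 ▸ PySem.Set.nodup_ofList ts
  rw [pvA_fold_eq]
  set dA := pvTriples.foldl (fun d p =>
      if (p.1 + p.2.1 + p.2.2) ∈ ts then
        d.modify (p.1 + p.2.1 + p.2.2) [] (fun l => l ++ [p]) else d) d0 with hdA
  set dB := ts.foldl (fun d t => d.insert t (pvCombos t))
      (PySem.Dict.empty : PySem.Dict Int (List (Int × Int × Int))) with hdB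
  have hkA : dA.keys = PySem.Set.ofList ts := by
    rw [hdA, pvA_keys ts _ d0 (fun s hs => hkeys0 ▸ (PySem.Set.mem_ofList ts s).mpr hs), hkeys0]
  have hkB : dB.keys = PySem.Set.ofList ts := by
    rw [hdB, PySem.Dict.keys_foldl_insert ts (fun _ t => pvCombos t) PySem.Dict.empty,
      PySem.Dict.keys_empty]
    rfl
  rw [PySem.Dict.items_eq_map_keys dA (hkA ▸ PySem.Set.nodup_ofList ts) [],
    PySem.Dict.items_eq_map_keys dB (hkB ▸ PySem.Set.nodup_ofList ts) [], hkA, hkB]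
  refine List.map_congr_left (fun k hk => ?_)
  have hkts : k ∈ ts := (PySem.Set.mem_ofList ts k).mp hk
  have hA : dA.getD k [] = pvTriples.filter (fun p => p.1 + p.2.1 + p.2.2 = k) := by
    rw [hdA, pvA_getD ts k hkts, pvD0_getD ts PySem.Dict.empty (fun _ => rfl), List.nil_append]
  have hB : dB.getD k [] = pvCombos k := by
    rw [hdB, pvB_getD, if_pos hkts]
  rw [hA, hB, pvCombos_eq_filter]
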